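-- pv_equiv track=rewrite | github.com/Gizem-G/Allotyping-BaseModel | auc_script.py | evaluate_n
-- ===== SOURCE A (Python) =====
-- def evaluate_n(patient, Allele_Patients_negative, output):
--     FP, TN = 0, 0
--     for patient in Allele_Patients_negative:
--         if output:
--             FP = 1
--         if not output:
--             TN = 1
--     return FP, TN
-- ===== SOURCE B (Python) =====
-- def evaluate_n(patient, Allele_Patients_negative, output):
--     nonempty = bool(Allele_Patients_negative)
--     FP = 1 if nonempty and output else 0
--     TN = 1 if nonempty and not output else 0
--     return FP, TN
-- ===== Notes on version B (the rewrite author's own statement) =====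
-- stated objective: simpler
-- what changed: Replaced the loop over all negative patients with a constant-time closed form: the flags depend only on whether the list is nonempty and on the truthiness of output.
import Mathlib
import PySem

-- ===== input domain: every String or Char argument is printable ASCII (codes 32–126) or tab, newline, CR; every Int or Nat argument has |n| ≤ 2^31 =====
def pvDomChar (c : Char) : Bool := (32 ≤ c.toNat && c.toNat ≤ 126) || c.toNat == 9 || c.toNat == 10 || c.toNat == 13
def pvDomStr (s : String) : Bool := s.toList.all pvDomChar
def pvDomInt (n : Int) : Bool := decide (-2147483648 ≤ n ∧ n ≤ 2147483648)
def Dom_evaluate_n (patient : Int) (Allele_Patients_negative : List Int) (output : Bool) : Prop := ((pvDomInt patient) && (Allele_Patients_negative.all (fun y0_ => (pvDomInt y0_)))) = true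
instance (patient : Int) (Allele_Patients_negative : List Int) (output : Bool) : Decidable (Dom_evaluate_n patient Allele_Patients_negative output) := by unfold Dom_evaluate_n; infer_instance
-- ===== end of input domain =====

-- ===== PORT A =====
-- A: loop over the list setting FP/TN flags (loop variable shadows `patient`; state is (FP, TN))
def evaluate_n (patient : Int) (Allele_Patients_negative : List Int) (output : Bool) : Int × Int :=
  Allele_Patients_negative.foldl
    (fun (st : Int × Int) _ =>
      let st := if output then (1, st.2) else st
      if !output then (st.1, 1) else st)
    (0, 0)

-- ===== PORT B =====
-- B: constant-time closed form — flags depend only on list nonemptiness and output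
def evaluate_n_alt (patient : Int) (Allele_Patients_negative : List Int) (output : Bool) : Int × Int :=
  let nonempty := !Allele_Patients_negative.isEmpty
  ((if nonempty && output then 1 else 0), (if nonempty && !output then 1 else 0))

-- ===== PRECONDITION & SPEC =====
def Spec_evaluate_n (patient : Int) (Allele_Patients_negative : List Int) (output : Bool) (out : Int × Int) : Prop := out = evaluate_n_alt patient Allele_Patients_negative output
instance (patient : Int) (Allele_Patients_negative : List Int) (output : Bool) (out : Int × Int) : Decidable (Spec_evaluate_n patient Allele_Patients_negative output out) := by unfold Spec_evaluate_n; infer_instance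

-- ===== CLAIM (what is proved, stated in full; the proofs are below) =====
def Claim_equal_evaluate_n : Prop := ∀ (patient : Int) (Allele_Patients_negative : List Int) (output : Bool), Dom_evaluate_n patient Allele_Patients_negative output → Spec_evaluate_n patient Allele_Patients_negative output (evaluate_n patient Allele_Patients_negative output)

-- ===== LEMMAS AND PROOFS =====

-- ===== VERDICT (by name: the statement is the Claim_ definition above) =====
theorem foldl_const (l : List Int) (v : Int × Int) (f : Int × Int → Int × Int)
    (h : f v = v) : l.foldl (fun st _ => f st) v = v := by
  induction l with
  | nil => rfl
  | cons x xs ih => simp [List.foldl, h, ih]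

theorem evaluate_n_spec : Claim_equal_evaluate_n := by
  intro patient l output _
  unfold Spec_evaluate_n evaluate_n evaluate_n_alt
  cases l with
  | nil => cases output <;> rfl
  | cons x xs =>
    cases output <;> simp <;>
      exact foldl_const xs _ _ rfl
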